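-- pv_equiv track=rewrite | github.com/Ishirui/ei-st5 | grid_navigation/grid_navigation.py | get_movements
-- ===== SOURCE A (Python) =====
-- card_movement_translation_matrix = \
--     {"n":{"n":"f", "s":"b", "e":"d", "w":"g"},\
--     "s":{"n":"b", "s":"f", "e":"g", "w":"d"},\
--     "e":{"n":"g", "s":"d", "e":"f", "w":"b"},\
--     "w":{"n":"d", "s":"g", "e":"b", "w":"f"}\
--     }
--
-- def get_movements(cardinals, start_cardinality):
--     res = []
--     last_cardinality = start_cardinality
--     for delivery in cardinals:
--         new_deliv = []
--         for prev_card, card in zip([last_cardinality]+delivery, delivery):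
--             movement = card_movement_translation_matrix[prev_card][card]
--             new_deliv.append(movement)
--             last_cardinality = card
--         res.append(new_deliv)
--
--     return res
-- ===== SOURCE B (Python) =====
-- def get_movements(cardinals, start_cardinality):
--     # staged passes: flatten all deliveries, compute every movement in one flat
--     # pairwise pass (quarter-turn arithmetic), then re-chunk by delivery lengths
--     angle = {'n': 0, 'e': 1, 's': 2, 'w': 3}
--     turn = ['f', 'd', 'b', 'g']
--     flat = [card for delivery in cardinals for card in delivery]
--     headings = [start_cardinality] + flat
--     moves = [turn[(angle[c] - angle[p]) % 4] for p, c in zip(headings, flat)]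
--     res = []
--     for delivery in cardinals:
--         res.append(moves[:len(delivery)])
--         moves = moves[len(delivery):]
--     return res
-- ===== Notes on version B (the rewrite author's own statement) =====
-- stated objective: alternative
-- what changed: Replaces A's nested stateful loop (carried last_cardinality, 4x4 translation table per step) by three staged passes: flatten all deliveries into one list, compute every movement in a single flat pairwise zip pass via quarter-turn angle arithmetic mod 4, then re-chunk the flat movement list back into delivery-sized slices.
import Mathlib
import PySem

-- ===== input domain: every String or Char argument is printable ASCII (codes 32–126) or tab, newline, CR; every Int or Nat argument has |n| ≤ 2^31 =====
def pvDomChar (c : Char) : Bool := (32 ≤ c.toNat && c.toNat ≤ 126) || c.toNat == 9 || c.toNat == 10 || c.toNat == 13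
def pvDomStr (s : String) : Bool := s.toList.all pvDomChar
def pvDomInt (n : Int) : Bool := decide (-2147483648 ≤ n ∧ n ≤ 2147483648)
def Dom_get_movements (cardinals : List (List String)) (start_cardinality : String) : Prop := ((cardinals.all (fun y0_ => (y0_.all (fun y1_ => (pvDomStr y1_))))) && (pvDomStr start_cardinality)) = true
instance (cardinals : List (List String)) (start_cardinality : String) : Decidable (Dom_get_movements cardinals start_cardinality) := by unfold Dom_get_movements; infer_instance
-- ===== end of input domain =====

-- B replaces A's nested stateful loop + 4x4 translation table by three staged
-- passes: flatten all deliveries, compute every movement in one flat pairwise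
-- zip pass via quarter-turn arithmetic, then re-chunk by delivery lengths.

-- ===== PORT A =====
-- the module constant card_movement_translation_matrix (a dict of dicts)
def transMatrix : PySem.Dict String (PySem.Dict String String) :=
  PySem.Dict.ofList
    [("n", PySem.Dict.ofList [("n","f"),("s","b"),("e","d"),("w","g")]),
     ("s", PySem.Dict.ofList [("n","b"),("s","f"),("e","g"),("w","d")]),
     ("e", PySem.Dict.ofList [("n","g"),("s","d"),("e","f"),("w","b")]),
     ("w", PySem.Dict.ofList [("n","d"),("s","g"),("e","b"),("w","f")])]

def get_movements (cardinals : List (List String)) (start_cardinality : String) : List (List String) :=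
  -- state: (res, last_cardinality); KeyError impossible inside Pre_, default "" outside
  (cardinals.foldl
    (fun (st : List (List String) × String) delivery =>
      let inner :=
        (List.zip (st.2 :: delivery) delivery).foldl
          (fun (s : List String × String) pc =>
            (s.1 ++ [(transMatrix.getD pc.1 (PySem.Dict.ofList [])).getD pc.2 ""], pc.2))
          ([], st.2)
      (st.1 ++ [inner.1], inner.2))
    ([], start_cardinality)).1

-- ===== PORT B =====
def angleDict : PySem.Dict String Int :=
  PySem.Dict.ofList [("n", 0), ("e", 1), ("s", 2), ("w", 3)]

def turnList : List String := ["f", "d", "b", "g"]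

def get_movements_alt (cardinals : List (List String)) (start_cardinality : String) : List (List String) :=
  -- pass 1: flatten; pass 2: flat pairwise movement list; pass 3: re-chunk by lengths
  -- (KeyError impossible inside Pre_, defaults 0 / "" outside)
  let flat := cardinals.flatMap (fun delivery => delivery)
  let headings := [start_cardinality] ++ flat
  let moves := (headings.zip flat).map
    (fun pc => (PySem.List.pyGet? turnList
        (PySem.Int.mod (angleDict.getD pc.2 0 - angleDict.getD pc.1 0) 4)).getD "")
  (cardinals.foldl
    (fun (st : List (List String) × List String) delivery =>
      (st.1 ++ [PySem.List.slice st.2 none (some (delivery.length : Int))],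
       PySem.List.slice st.2 (some (delivery.length : Int)) none))
    ([], moves)).1

-- ===== PRECONDITION & SPEC =====
-- Pre_ excludes exactly the inputs where A raises KeyError: some cardinal outside
-- {"n","s","e","w"}, or an invalid start_cardinality that is actually looked up
-- (i.e. some delivery is non-empty).
def Pre_get_movements (cardinals : List (List String)) (start_cardinality : String) : Prop :=
  (∀ d ∈ cardinals, ∀ c ∈ d, c ∈ ["n", "s", "e", "w"]) ∧
  (start_cardinality ∈ ["n", "s", "e", "w"] ∨ ∀ d ∈ cardinals, d = [])
instance (cardinals : List (List String)) (start_cardinality : String) : Decidable (Pre_get_movements cardinals start_cardinality) := by unfold Pre_get_movements; infer_instance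

def pvWitness_get_movements : List (List String) × String := ([["n", "e"], [], ["w"]], "s")

def Spec_get_movements (cardinals : List (List String)) (start_cardinality : String) (out : List (List String)) : Prop := out = get_movements_alt cardinals start_cardinality
instance (cardinals : List (List String)) (start_cardinality : String) (out : List (List String)) : Decidable (Spec_get_movements cardinals start_cardinality out) := by unfold Spec_get_movements; infer_instance

-- ===== CLAIM (what is proved, stated in full; the proofs are below) =====
def Claim_equal_get_movements : Prop := ∀ (cardinals : List (List String)) (start_cardinality : String), Dom_get_movements cardinals start_cardinality → Pre_get_movements cardinals start_cardinality → Spec_get_movements cardinals start_cardinality (get_movements cardinals start_cardinality)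

-- ===== LEMMAS AND PROOFS =====

-- one movement by B's rotation formula
def mv (p c : String) : String :=
  (PySem.List.pyGet? turnList
      (PySem.Int.mod (angleDict.getD c 0 - angleDict.getD p 0) 4)).getD ""

-- the movement list one delivery contributes, starting from heading `last`
def chunk (last : String) (d : List String) : List String :=
  ((last :: d).zip d).map (fun pc => mv pc.1 pc.2)

-- one movement: table lookup = rotation formula, for all 16 valid pairs
theorem move_eq (p c : String) (hp : p ∈ ["n", "s", "e", "w"]) (hc : c ∈ ["n", "s", "e", "w"]) :
    (transMatrix.getD p (PySem.Dict.ofList [])).getD c "" = mv p c := by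
  fin_cases hp <;> fin_cases hc <;> decide

theorem getLastD_cons_eq (c last : String) (cs : List String) :
    (c :: cs).getLastD last = cs.getLastD c := by
  cases cs <;> simp [List.getLastD]

theorem chunk_cons (last c : String) (cs : List String) :
    chunk last (c :: cs) = mv last c :: chunk c cs := by
  simp [chunk]

theorem chunk_length (last : String) (d : List String) :
    (chunk last d).length = d.length := by
  induction d generalizing last with
  | nil => rfl
  | cons c cs ih => rw [chunk_cons]; simp [ih]

-- A's inner zip-fold produces exactly `chunk` and finishes at the last cardinal
theorem innerA_eq (d : List String) (acc : List String) (last : String)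
    (hl : last ∈ ["n", "s", "e", "w"]) (hd : ∀ c ∈ d, c ∈ ["n", "s", "e", "w"]) :
    (List.zip (last :: d) d).foldl
        (fun (s : List String × String) pc =>
          (s.1 ++ [(transMatrix.getD pc.1 (PySem.Dict.ofList [])).getD pc.2 ""], pc.2))
        (acc, last) =
    (acc ++ chunk last d, d.getLastD last) := by
  induction d generalizing acc last with
  | nil => simp [chunk]
  | cons c cs ih =>
      have hc : c ∈ ["n", "s", "e", "w"] := hd c (by simp)
      simp only [List.zip_cons_cons, List.foldl_cons]
      rw [move_eq last c hl hc, ih (acc ++ [mv last c]) c hc (fun x hx => hd x (by simp [hx]))]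
      rw [chunk_cons, getLastD_cons_eq]
      simp

-- splitting the flat pairwise zip at a delivery boundary
theorem zip_split (d r : List String) (last : String) :
    (last :: (d ++ r)).zip (d ++ r) =
    (last :: d).zip d ++ ((d.getLastD last) :: r).zip r := by
  induction d generalizing last with
  | nil => simp
  | cons c cs ih => rw [getLastD_cons_eq]; simp [ih c]

theorem getLastD_valid (d : List String) (last : String)
    (hl : last ∈ ["n", "s", "e", "w"]) (hd : ∀ c ∈ d, c ∈ ["n", "s", "e", "w"]) :
    d.getLastD last ∈ ["n", "s", "e", "w"] := by
  induction d generalizing last with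
  | nil => exact hl
  | cons c cs ih =>
      rw [List.getLastD_cons]
      exact ih c (hd c (by simp)) (fun x hx => hd x (by simp [hx]))

-- B's flat pairwise movement list for the whole remaining input
def movesAll (last : String) (cs : List (List String)) : List String :=
  ((last :: cs.flatMap (fun d => d)).zip (cs.flatMap (fun d => d))).map
    (fun pc => mv pc.1 pc.2)

theorem movesAll_cons (last : String) (d : List String) (ds : List (List String)) :
    movesAll last (d :: ds) = chunk last d ++ movesAll (d.getLastD last) ds := by
  simp only [movesAll, chunk, List.flatMap_cons, zip_split d (ds.flatMap (fun x => x)) last,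
    List.map_append]

-- main fold correspondence: A's stateful outer fold = B's re-chunking fold
theorem fold_eq (cs : List (List String)) (acc : List (List String)) (last : String)
    (hl : last ∈ ["n", "s", "e", "w"]) (hcs : ∀ d ∈ cs, ∀ c ∈ d, c ∈ ["n", "s", "e", "w"]) :
    (cs.foldl
        (fun (st : List (List String) × String) delivery =>
          let inner :=
            (List.zip (st.2 :: delivery) delivery).foldl
              (fun (s : List String × String) pc =>
                (s.1 ++ [(transMatrix.getD pc.1 (PySem.Dict.ofList [])).getD pc.2 ""], pc.2))
              ([], st.2)
          (st.1 ++ [inner.1], inner.2))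
        (acc, last)).1 =
    (cs.foldl
        (fun (st : List (List String) × List String) delivery =>
          (st.1 ++ [PySem.List.slice st.2 none (some (delivery.length : Int))],
           PySem.List.slice st.2 (some (delivery.length : Int)) none))
        (acc, movesAll last cs)).1 := by
  induction cs generalizing acc last with
  | nil => rfl
  | cons d ds ih =>
      have hd : ∀ c ∈ d, c ∈ ["n", "s", "e", "w"] := hcs d (by simp)
      simp only [List.foldl_cons]
      rw [innerA_eq d [] last hl hd]
      rw [movesAll_cons, PySem.List.slice_to_natCast, PySem.List.slice_from_natCast,
          ← chunk_length last d, List.take_left, List.drop_left]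
      simp only [List.nil_append]
      exact ih _ _ (getLastD_valid d last hl hd) (fun x hx => hcs x (by simp [hx]))

-- degenerate case: every delivery empty, start string arbitrary
theorem fold_empty_eq (cs : List (List String)) (acc : List (List String)) (last : String)
    (moves : List String) (hcs : ∀ d ∈ cs, d = []) :
    (cs.foldl
        (fun (st : List (List String) × String) delivery =>
          let inner :=
            (List.zip (st.2 :: delivery) delivery).foldl
              (fun (s : List String × String) pc =>
                (s.1 ++ [(transMatrix.getD pc.1 (PySem.Dict.ofList [])).getD pc.2 ""], pc.2))
              ([], st.2)
          (st.1 ++ [inner.1], inner.2))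
        (acc, last)).1 =
    (cs.foldl
        (fun (st : List (List String) × List String) delivery =>
          (st.1 ++ [PySem.List.slice st.2 none (some (delivery.length : Int))],
           PySem.List.slice st.2 (some (delivery.length : Int)) none))
        (acc, moves)).1 := by
  induction cs generalizing acc last moves with
  | nil => rfl
  | cons d ds ih =>
      have hd : d = [] := hcs d (by simp)
      subst hd
      simp only [List.foldl_cons, List.zip_nil_right, List.foldl_nil, List.length_nil,
        Nat.cast_zero, PySem.List.slice_zero_start]
      rw [show PySem.List.slice moves none (some (0:Int)) = [] by
            simpa using PySem.List.slice_to_natCast (xs := moves) (b := 0)]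
      exact ih _ last _ (fun x hx => hcs x (by simp [hx]))

-- ===== VERDICT (by name: the statement is the Claim_ definition above) =====
theorem get_movements_spec : Claim_equal_get_movements := by
  intro cardinals start _hdom hpre
  unfold Spec_get_movements get_movements get_movements_alt
  rcases hpre with ⟨hcards, hstart | hempty⟩
  · exact fold_eq cardinals [] start hstart hcards
  · have hflat : cardinals.flatMap (fun d => d) = [] := by
      simp only [List.flatMap_eq_nil_iff]; exact hempty
    simp only [hflat, List.append_nil, List.zip_nil_right, List.map_nil]
    exact fold_empty_eq cardinals [] start _ hempty
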